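-- pv_equiv track=rewrite | github.com/JunyiTao/Computational-Philosophy-Project-with-Stanford-Encyclopedia-of-Philosophy | analysis/search_updated/src/preprocessing.py | parse_hierarchy
-- ===== SOURCE A (Python) =====
-- SECTION_SPLITTER = ' || '
--
-- def parse_hierarchy(titles):
--     # parse the hierarchy of section titles, e.g. if 1. A, 1.1 B then A - B
--     # This function parses a list of section titles into a hierarchy-indicated format.
--
--     result = []  # Stores the final formatted titles
--     current_hierarchy = []  # Stack to maintain the current path of titles
--
--     for title in titles:
--         # Split the title into the numeric part and text part
--         number, text = title.split(' ', 1)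
--         if not number.endswith('.'):
--             number = number + '.'
--         # Calculate the depth based on the number of dots in the number part
--         level = number.count('.')
--
--         # Adjust the hierarchy stack to the current level
--         current_hierarchy = current_hierarchy[:level-1]
--         # Add the current section title
--         current_hierarchy.append(text.strip())
--
--         # Join all elements in the current_hierarchy with a hyphen
--         result.append(SECTION_SPLITTER.join(current_hierarchy))
--
--     return result
-- ===== SOURCE B (Python) =====
-- SECTION_SPLITTER = ' || '
--
-- def parse_hierarchy(titles):
--     # Two staged passes, no stack of pieces and no list truncation:
--     # stage 1 parses every title into (level, stripped text); stage 2 computes the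
--     # effective depth arithmetically (depth = min(depth, level - 1) + 1) and keeps a
--     # table mapping each depth to the latest full path seen at that depth, so each
--     # output extends the table entry one level up. Stale deeper entries are never
--     # consulted: a depth-d lookup always hits the most recent depth-(d-1) path,
--     # which is exactly the joined prefix A's stack would hold.
--     parsed = []
--     for title in titles:
--         number, text = title.split(' ', 1)
--         if not number.endswith('.'):
--             number = number + '.'
--         parsed.append((number.count('.'), text.strip()))
--
--     result = []
--     path_at_depth = {}
--     depth = 0
--     for level, text in parsed:
--         depth = min(depth, level - 1) + 1
--         path = text if depth == 1 else path_at_depth[depth - 1] + SECTION_SPLITTER + text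
--         path_at_depth[depth] = path
--         result.append(path)
--     return result
-- ===== Notes on version B (the rewrite author's own statement) =====
-- stated objective: alternative
-- what changed: B replaces A's single pass over a truncated stack of title pieces (re-joined each iteration) by two staged passes: a parsing pass producing (level, text) pairs, then a pass that computes the effective depth arithmetically and reads/writes a per-depth table of latest full paths, never truncating a list or joining more than two strings.
import Mathlib
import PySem

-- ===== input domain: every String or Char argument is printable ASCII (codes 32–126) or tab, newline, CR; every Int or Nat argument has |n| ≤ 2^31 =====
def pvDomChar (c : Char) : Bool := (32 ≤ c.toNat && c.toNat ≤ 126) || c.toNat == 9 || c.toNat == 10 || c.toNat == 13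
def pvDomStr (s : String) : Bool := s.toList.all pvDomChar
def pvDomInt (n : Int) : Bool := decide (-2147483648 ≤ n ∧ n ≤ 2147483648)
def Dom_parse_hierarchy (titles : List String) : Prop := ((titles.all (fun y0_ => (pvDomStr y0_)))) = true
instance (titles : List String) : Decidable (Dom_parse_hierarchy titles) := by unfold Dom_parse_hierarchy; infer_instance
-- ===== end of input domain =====

-- B replaces A's truncated stack of title pieces (re-joined every iteration) by two
-- staged passes: parse all titles, then build each path from a per-depth table of
-- latest full paths, computing the effective depth arithmetically.


-- ===== PORT A =====
-- one iteration of A's loop: state = (result, current_hierarchy)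
-- Python raises ValueError when the title has no ' ' (unpacking a 1-list); that
-- case (the `| _ =>` branch, excluded by Pre_) leaves the state unchanged.
def parse_hierarchy_stepA (st : List String × List String) (title : String) :
    List String × List String :=
  match PySem.Str.splitMax? title " " 1 with
  | some (number :: text :: _) =>
    let number := if PySem.Str.endswith number "." then number else number ++ "."
    let level := PySem.Str.count number "."
    let hier := st.2.take (level - 1)
    let hier := hier ++ [PySem.Str.strip text]
    (st.1 ++ [PySem.Str.join " || " hier], hier)
  | _ => st

def parse_hierarchy (titles : List String) : List String :=
  (titles.foldl parse_hierarchy_stepA ([], [])).1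

-- ===== PORT B =====
-- stage 1: parse one title into (level, stripped text); `none` is the title with no
-- space, where Python B raises ValueError (excluded by Pre_; stepB skips it).
-- level ≥ 1 in Python (number ends with '.'), so Nat subtraction `level - 1` is exact.
def parse_hierarchy_parseB (title : String) : Option (Nat × String) :=
  match PySem.Str.splitMax? title " " 1 with
  | some (number :: text :: _) =>
    let number := if PySem.Str.endswith number "." then number else number ++ "."
    some (PySem.Str.count number ".", PySem.Str.strip text)
  | _ => none

-- stage 2: state = (result, path_at_depth table, depth). The `path_at_depth[depth-1]`
-- lookup always succeeds in Python (every depth 1..current is populated); getD's ""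
-- default is unreachable.
def parse_hierarchy_stepB (st : List String × PySem.Dict Nat String × Nat)
    (p : Option (Nat × String)) : List String × PySem.Dict Nat String × Nat :=
  match p with
  | none => st
  | some (level, text) =>
    let depth := min st.2.2 (level - 1) + 1
    let path := if depth == 1 then text
                else (st.2.1.getD (depth - 1) "") ++ " || " ++ text
    (st.1 ++ [path], st.2.1.insert depth path, depth)

def parse_hierarchy_alt (titles : List String) : List String :=
  ((titles.map parse_hierarchy_parseB).foldl parse_hierarchy_stepB
    ([], PySem.Dict.empty, 0)).1

-- ===== PRECONDITION & SPEC =====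
-- Pre_ excludes exactly the titles without a space: there `title.split(' ', 1)`
-- yields one piece and Python's unpacking raises ValueError.
def Pre_parse_hierarchy (titles : List String) : Prop :=
  ∀ t ∈ titles, PySem.Str.isIn " " t = true

instance (titles : List String) : Decidable (Pre_parse_hierarchy titles) := by
  unfold Pre_parse_hierarchy; infer_instance

def pvWitness_parse_hierarchy : List String :=
  ["1. Intro", "1.1 History", "1.2 Scope", "2. Methods"]

def Spec_parse_hierarchy (titles : List String) (out : List String) : Prop := out = parse_hierarchy_alt titles
instance (titles : List String) (out : List String) : Decidable (Spec_parse_hierarchy titles out) := by unfold Spec_parse_hierarchy; infer_instance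

-- ===== CLAIM (what is proved, stated in full; the proofs are below) =====
def Claim_equal_parse_hierarchy : Prop := ∀ (titles : List String), Dom_parse_hierarchy titles → Pre_parse_hierarchy titles → Spec_parse_hierarchy titles (parse_hierarchy titles)

-- ===== LEMMAS AND PROOFS =====

theorem joinS_cons (x : String) (ys : List String) (h : ys ≠ []) :
    PySem.Str.join " || " (x :: ys) = x ++ " || " ++ PySem.Str.join " || " ys := by
  cases ys with
  | nil => exact absurd rfl h
  | cons b l =>
    apply String.toList_inj.mp
    simp [PySem.Str.join, PySem.Chars.join_cons_cons]

theorem joinS_singleton (t : String) : PySem.Str.join " || " [t] = t := by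
  apply String.toList_inj.mp
  simp [PySem.Str.join, PySem.Chars.join_singleton]

theorem joinS_append_singleton (l : List String) (t : String) (h : l ≠ []) :
    PySem.Str.join " || " (l ++ [t]) = PySem.Str.join " || " l ++ " || " ++ t := by
  induction l with
  | nil => exact absurd rfl h
  | cons x xs ih =>
    cases xs with
    | nil => simp [joinS_cons x [t] (by simp), joinS_singleton]
    | cons b bl =>
      rw [List.cons_append, joinS_cons x ((b :: bl) ++ [t]) (by simp),
        ih (by simp), joinS_cons x (b :: bl) (by simp)]
      simp [String.append_assoc]

-- the simulation invariant: B's depth counter is A's stack length, and B's table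
-- holds, at every key 1..depth, the joined prefix of A's stack of that length
def InvB (hier : List String) (d : PySem.Dict Nat String) (depth : Nat) : Prop :=
  depth = hier.length ∧
  ∀ k : Nat, 1 ≤ k → k ≤ hier.length →
    d.getD k "" = PySem.Str.join " || " (hier.take k)

theorem step_sim (res hier : List String) (d : PySem.Dict Nat String) (depth : Nat)
    (hinv : InvB hier d depth) (title : String) :
    (parse_hierarchy_stepB (res, d, depth) (parse_hierarchy_parseB title)).1 =
      (parse_hierarchy_stepA (res, hier) title).1 ∧
    InvB (parse_hierarchy_stepA (res, hier) title).2
      (parse_hierarchy_stepB (res, d, depth) (parse_hierarchy_parseB title)).2.1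
      (parse_hierarchy_stepB (res, d, depth) (parse_hierarchy_parseB title)).2.2 := by
  obtain ⟨hd, htab⟩ := hinv
  cases hsp : PySem.Str.splitMax? title " " 1 with
  | none =>
    simp only [parse_hierarchy_stepA, parse_hierarchy_parseB, parse_hierarchy_stepB, hsp]
    exact ⟨trivial, hd, htab⟩
  | some l =>
    match l with
    | [] =>
      simp only [parse_hierarchy_stepA, parse_hierarchy_parseB, parse_hierarchy_stepB, hsp]
      exact ⟨trivial, hd, htab⟩
    | [n] =>
      simp only [parse_hierarchy_stepA, parse_hierarchy_parseB, parse_hierarchy_stepB, hsp]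
      exact ⟨trivial, hd, htab⟩
    | number :: text :: rest =>
      simp only [parse_hierarchy_stepA, parse_hierarchy_parseB, parse_hierarchy_stepB, hsp]
      set number' := if PySem.Str.endswith number "." then number else number ++ "." with hn
      set ℓ := PySem.Str.count number' "." with hl
      set stripped := PySem.Str.strip text with hst
      -- the truncated stack and its length
      set tk := hier.take (ℓ - 1) with htk
      have htklen : tk.length = min depth (ℓ - 1) := by
        simp [htk, hd, Nat.min_comm]
      -- B's new depth is A's new stack length
      have hdepth' : min depth (ℓ - 1) + 1 = (tk ++ [stripped]).length := by
        simp [htklen]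
      -- B's new path equals A's joined path
      have hpath : (if (min depth (ℓ - 1) + 1) == 1 then stripped
            else (d.getD (min depth (ℓ - 1) + 1 - 1) "") ++ " || " ++ stripped)
          = PySem.Str.join " || " (tk ++ [stripped]) := by
        by_cases h0 : min depth (ℓ - 1) = 0
        · have : tk = [] := by
            rw [← List.length_eq_zero_iff, htklen, h0]
          simp [h0, this, joinS_singleton]
        · have h1 : 1 ≤ min depth (ℓ - 1) := Nat.one_le_iff_ne_zero.mpr h0
          have hne : (min depth (ℓ - 1) + 1 == 1) = false := by
            simp; omega
          have hle : min depth (ℓ - 1) ≤ hier.length := by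
            rw [← hd]; exact Nat.min_le_left _ _
          have htk_ne : tk ≠ [] := by
            intro h; rw [h] at htklen; simp at htklen; omega
          have hget : d.getD (min depth (ℓ - 1)) "" =
              PySem.Str.join " || " (hier.take (min depth (ℓ - 1))) :=
            htab _ h1 hle
          have htake_eq : hier.take (min depth (ℓ - 1)) = tk := by
            rw [htk, hd, Nat.min_comm, ← List.take_take, List.take_length]
          rw [hne, if_neg (by simp), Nat.add_sub_cancel, hget, htake_eq,
            joinS_append_singleton tk stripped htk_ne]
      refine ⟨by rw [hpath], ?_, ?_⟩
      · simpa using hdepth'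
      · -- table invariant for the new state
        intro k hk1 hk2
        set path := (if (min depth (ℓ - 1) + 1) == 1 then stripped
            else (d.getD (min depth (ℓ - 1) + 1 - 1) "") ++ " || " ++ stripped) with hpdef
        by_cases hk : k = min depth (ℓ - 1) + 1
        · rw [hk, PySem.Dict.getD_insert_self,
            List.take_of_length_le (by omega : (tk ++ [stripped]).length ≤ min depth (ℓ - 1) + 1)]
          exact hpath
        · have hklt : k < min depth (ℓ - 1) + 1 := by
            simp only [List.length_append, List.length_singleton, htklen] at hk2
            omega
          have hkle : k ≤ min depth (ℓ - 1) := by omega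
          rw [PySem.Dict.getD_insert_of_ne d _ _ (by omega : k ≠ min depth (ℓ - 1) + 1)]
          have hget := htab k hk1 (le_trans hkle (by rw [← hd]; exact Nat.min_le_left _ _))
          rw [hget]
          congr 1
          rw [List.take_append_of_le_length (by omega), htk, List.take_take]
          congr 1
          omega

theorem fold_sim (titles : List String) (res hier : List String)
    (d : PySem.Dict Nat String) (depth : Nat) (hinv : InvB hier d depth) :
    ((titles.map parse_hierarchy_parseB).foldl parse_hierarchy_stepB (res, d, depth)).1 =
      (titles.foldl parse_hierarchy_stepA (res, hier)).1 := by
  induction titles generalizing res hier d depth with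
  | nil => simp
  | cons t ts ih =>
    simp only [List.map_cons, List.foldl_cons]
    obtain ⟨h1, h2⟩ := step_sim res hier d depth hinv t
    set stB := parse_hierarchy_stepB (res, d, depth) (parse_hierarchy_parseB t) with hB
    set stA := parse_hierarchy_stepA (res, hier) t with hA
    have : stB = (stA.1, stB.2.1, stB.2.2) := by
      rw [← h1]
    rw [this]
    exact ih stA.1 stA.2 stB.2.1 stB.2.2 h2

-- ===== VERDICT (by name: the statement is the Claim_ definition above) =====
theorem parse_hierarchy_spec : Claim_equal_parse_hierarchy := by
  intro titles _ _
  unfold Spec_parse_hierarchy parse_hierarchy parse_hierarchy_alt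
  exact (fold_sim titles [] [] PySem.Dict.empty 0
    ⟨rfl, by intro k hk1 hk2; simp at hk2; omega⟩).symm
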